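-- pv_equiv track=rewrite | github.com/agenta2z/RichPythonUtils | src/rich_python_utils/string_utils/prefix_suffix.py | _get_token_index_before_common_suffix
-- ===== SOURCE A (Python) =====
-- def _get_token_index_before_common_suffix(tks):
--     """
--     Returns the index of the first token in the common suffix of a list of tokens.
--
--     Examples:
--         >>> _get_token_index_before_common_suffix(
--         ...    [['turn', 'on', 'the', 'light'], ['turn', 'off', 'the', 'light']]
--         ... )
--         -3
--     """
--     i = -1
--     min_tk_len = min(len(x) for x in tks)
--     while i > -min_tk_len - 1:
--         if any((tks[j][i] != tks[0][i]) for j in range(1, len(tks))):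
--             break
--         i -= 1
--     return i
-- ===== SOURCE B (Python) =====
-- def _get_token_index_before_common_suffix(tks):
--     # Row-wise fold: maintain the running common suffix, shrinking it against
--     # each further token list, instead of scanning columns from the end.
--     suf = tks[0]
--     for tk in tks[1:]:
--         n = 0
--         while n < len(suf) and n < len(tk) and suf[-1 - n] == tk[-1 - n]:
--             n += 1
--         suf = suf[len(suf) - n:]
--     return -len(suf) - 1
-- ===== Notes on version B (the rewrite author's own statement) =====
-- stated objective: alternative
-- what changed: Replaces A's column-wise scan (walk negative suffix positions, comparing every list to the first at each position) by a row-wise fold that keeps the running common suffix as a list and shrinks it against each further token list.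
import Mathlib
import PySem

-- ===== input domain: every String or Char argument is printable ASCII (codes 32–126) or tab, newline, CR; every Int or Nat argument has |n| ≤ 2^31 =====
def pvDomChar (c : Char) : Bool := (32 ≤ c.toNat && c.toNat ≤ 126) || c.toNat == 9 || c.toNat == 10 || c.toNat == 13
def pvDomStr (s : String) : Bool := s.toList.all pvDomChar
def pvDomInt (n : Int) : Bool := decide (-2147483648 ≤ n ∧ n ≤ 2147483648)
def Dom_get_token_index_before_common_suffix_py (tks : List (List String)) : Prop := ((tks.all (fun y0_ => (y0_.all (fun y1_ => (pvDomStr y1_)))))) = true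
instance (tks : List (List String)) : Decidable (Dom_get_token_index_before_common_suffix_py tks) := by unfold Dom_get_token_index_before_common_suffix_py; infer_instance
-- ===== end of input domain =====

-- B replaces A's column-wise while-loop (scan suffix positions, comparing every list to
-- the first at each position) by a row-wise fold that maintains the running common suffix
-- and shrinks it against each further token list (alternative decomposition; same cost).

-- ===== PORT A =====
-- any((tks[j][i] != tks[0][i]) for j in range(1, len(tks)))
def pvAnyDiff (tks : List (List String)) (i : Int) : Bool :=
  (PySem.List.pyRange 1 (tks.length : Int) 1).any (fun j =>
    decide (PySem.List.pyGet? (PySem.List.pyGetD tks j []) i ≠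
            PySem.List.pyGet? (PySem.List.pyGetD tks 0 []) i))

-- the while-loop; starting at i = -1 with fuel = min token length, fuel = 0 exactly
-- when the loop condition i > -min_tk_len - 1 fails
def pvALoop (tks : List (List String)) : Nat → Int → Int
  | 0, i => i
  | fuel + 1, i => if pvAnyDiff tks i then i else pvALoop tks fuel (i - 1)

def get_token_index_before_common_suffix_py (tks : List (List String)) : Int :=
  match PySem.List.min? (tks.map (fun x => (x.length : Int))) (fun v => v) with
  | none => 0  -- Python: min() of empty sequence raises ValueError; excluded by Pre_
  | some m => pvALoop tks m.toNat (-1)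

-- ===== PORT B =====
-- the inner while loop: n += 1 while n < len(suf) and n < len(tk) and suf[-1-n] == tk[-1-n];
-- fuel = min(len suf, len tk) suffices, since the loop condition bounds n by it
def pvCSLoop (suf tk : List String) : Nat → Nat → Nat
  | 0, n => n
  | fuel + 1, n =>
    if n < suf.length ∧ n < tk.length ∧
        PySem.List.pyGet? suf (-1 - (n : Int)) = PySem.List.pyGet? tk (-1 - (n : Int))
    then pvCSLoop suf tk fuel (n + 1)
    else n

-- suf = suf[len(suf)-n:]
def pvCS (suf tk : List String) : List String :=
  PySem.List.slice suf (some ((suf.length - pvCSLoop suf tk (min suf.length tk.length) 0 : Nat) : Int)) none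

def get_token_index_before_common_suffix_py_alt (tks : List (List String)) : Int :=
  match tks with
  | [] => 0  -- Python B: tks[0] raises IndexError on empty input; excluded by Pre_
  | t0 :: rest => -((rest.foldl pvCS t0).length : Int) - 1

-- ===== PRECONDITION & SPEC =====
-- Pre_ excludes only the empty list, on which A raises ValueError (min of an empty
-- sequence) and B raises IndexError (tks[0])
def Pre_get_token_index_before_common_suffix_py (tks : List (List String)) : Prop := tks ≠ []
instance (tks : List (List String)) : Decidable (Pre_get_token_index_before_common_suffix_py tks) := by unfold Pre_get_token_index_before_common_suffix_py; infer_instance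
def pvWitness_get_token_index_before_common_suffix_py : List (List String) :=
  [["turn", "on", "the", "light"], ["turn", "off", "the", "light"]]

def Spec_get_token_index_before_common_suffix_py (tks : List (List String)) (out : Int) : Prop := out = get_token_index_before_common_suffix_py_alt tks
instance (tks : List (List String)) (out : Int) : Decidable (Spec_get_token_index_before_common_suffix_py tks out) := by unfold Spec_get_token_index_before_common_suffix_py; infer_instance

-- ===== CLAIM (what is proved, stated in full; the proofs are below) =====
def Claim_equal_get_token_index_before_common_suffix_py : Prop := ∀ (tks : List (List String)), Dom_get_token_index_before_common_suffix_py tks → Pre_get_token_index_before_common_suffix_py tks → Spec_get_token_index_before_common_suffix_py tks (get_token_index_before_common_suffix_py tks)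

-- ===== LEMMAS AND PROOFS =====

-- proof-side: longest common prefix of two lists; both programs compute
-- -(length of the common prefix of the reversed token lists) - 1
def pvCP : List String → List String → List String
  | a :: as, b :: bs => if a = b then a :: pvCP as bs else []
  | _, _ => []

theorem pvCP_nil_right : ∀ (x : List String), pvCP x [] = [] := fun x => by cases x <;> rfl

theorem pvCP_prefix : ∀ (a b : List String), pvCP a b <+: a
  | a :: as, b :: bs => by
    simp only [pvCP]
    split
    · exact List.cons_prefix_cons.mpr ⟨rfl, pvCP_prefix as bs⟩
    · exact List.nil_prefix
  | [], _ => by simp [pvCP]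
  | _ :: _, [] => by simp [pvCP]

theorem prefix_getElem? {p a : List String} (h : p <+: a) {j : Nat} (hj : j < p.length) :
    p[j]? = a[j]? := by
  obtain ⟨t, rfl⟩ := h
  rw [List.getElem?_append_left hj]

theorem lt_length_pvCP_iff : ∀ (a b : List String) (k : Nat),
    (k < (pvCP a b).length ↔ ∀ j ≤ k, j < a.length ∧ a[j]? = b[j]?)
  | a :: as, b :: bs, k => by
    simp only [pvCP]
    split
    · rename_i hab
      subst hab
      cases k with
      | zero => simp
      | succ k =>
        rw [List.length_cons, Nat.succ_lt_succ_iff, lt_length_pvCP_iff as bs k]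
        constructor
        · intro h j hj
          cases j with
          | zero => simp
          | succ j =>
            obtain ⟨h1, h2⟩ := h j (by omega)
            simpa using ⟨h1, h2⟩
        · intro h j hj
          have := h (j + 1) (by omega)
          simpa using this
    · rename_i hab
      simp only [List.length_nil, Nat.not_lt_zero, false_iff]
      intro h
      have := (h 0 (by omega)).2
      simp at this
      exact hab this
  | [], b, k => by
    simp only [pvCP, List.length_nil, Nat.not_lt_zero, false_iff]
    intro h
    exact absurd (h 0 (by omega)).1 (by simp)
  | a :: as, [], k => by
    simp only [pvCP, List.length_nil, Nat.not_lt_zero, false_iff]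
    intro h
    have := (h 0 (by omega)).2
    simp at this

theorem lt_length_foldl_pvCP_iff : ∀ (rs : List (List String)) (r0 : List String) (k : Nat),
    k < (rs.foldl pvCP r0).length ↔ ∀ j ≤ k, j < r0.length ∧ ∀ r ∈ rs, r[j]? = r0[j]?
  | [], r0, k => by
    simp only [List.foldl_nil]
    constructor
    · intro h j hj
      exact ⟨by omega, by simp⟩
    · intro h
      exact (h k le_rfl).1
  | r :: rs, r0, k => by
    simp only [List.foldl_cons]
    rw [lt_length_foldl_pvCP_iff rs (pvCP r0 r) k]
    constructor
    · intro h j hjk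
      obtain ⟨h1, h2⟩ := h j hjk
      have hpre := (lt_length_pvCP_iff r0 r j).mp h1
      obtain ⟨hr0, heq⟩ := hpre j le_rfl
      refine ⟨hr0, ?_⟩
      intro r' hr'
      rcases List.mem_cons.mp hr' with rfl | hr'
      · exact heq.symm
      · rw [h2 r' hr', prefix_getElem? (pvCP_prefix r0 r) h1]
    · intro h j hjk
      have h1 : j < (pvCP r0 r).length := by
        rw [lt_length_pvCP_iff]
        intro i hij
        exact ⟨(h i (by omega)).1, ((h i (by omega)).2 r (by simp)).symm⟩
      refine ⟨h1, fun r' hr' => ?_⟩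
      rw [(h j hjk).2 r' (by simp [hr']), prefix_getElem? (pvCP_prefix r0 r) h1]

-- pyGet? with negative index -1-n reads the reversed list at n
theorem pyGet?_neg_rev (l : List String) (n : Nat) :
    PySem.List.pyGet? l (-1 - (n : Int)) = l.reverse[n]? := by
  by_cases h : n < l.length
  · have : (-1 - (n : Int)) = -(((n+1 : Nat)) : Int) := by push_cast; ring
    rw [this, PySem.List.pyGet?_neg_natCast l (n+1) (by omega) (by omega), List.getElem?_reverse h]
    congr 1
    omega
  · rw [List.getElem?_eq_none (by simp; omega)]
    rw [PySem.List.pyGet?_eq_none_iff]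
    unfold PySem.Raise.InRange
    omega

-- B's inner loop counts the common prefix length of the reversed remainders
theorem pvCSLoop_eq (suf tk : List String) : ∀ (fuel n : Nat),
    min suf.length tk.length ≤ n + fuel →
    pvCSLoop suf tk fuel n = n + (pvCP (suf.reverse.drop n) (tk.reverse.drop n)).length
  | 0, n => by
    intro h
    have : suf.reverse.drop n = [] ∨ tk.reverse.drop n = [] := by
      rcases min_le_iff.mp h with h' | h'
      · exact Or.inl (List.drop_eq_nil_of_le (by simpa using h'))
      · exact Or.inr (List.drop_eq_nil_of_le (by simpa using h'))
    rcases this with h' | h' <;> rw [h']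
    · simp [pvCP, pvCSLoop]
    · rw [pvCP_nil_right]
      simp [pvCSLoop]
  | fuel + 1, n => by
    intro h
    rw [pvCSLoop]
    rw [pyGet?_neg_rev, pyGet?_neg_rev]
    split
    · rename_i hc
      obtain ⟨h1, h2, h3⟩ := hc
      have hs : n < suf.reverse.length := by simpa using h1
      have ht : n < tk.reverse.length := by simpa using h2
      rw [pvCSLoop_eq suf tk fuel (n + 1) (by omega)]
      rw [List.drop_eq_getElem_cons hs, List.drop_eq_getElem_cons ht]
      rw [List.getElem?_eq_getElem hs, List.getElem?_eq_getElem ht] at h3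
      simp only [Option.some.injEq] at h3
      simp [pvCP, h3]
      omega
    · rename_i hc
      push_neg at hc
      by_cases h1 : n < suf.length
      · by_cases h2 : n < tk.length
        · have h3 := hc h1 h2
          have hs : n < suf.reverse.length := by simpa using h1
          have ht : n < tk.reverse.length := by simpa using h2
          rw [List.drop_eq_getElem_cons hs, List.drop_eq_getElem_cons ht]
          rw [List.getElem?_eq_getElem hs, List.getElem?_eq_getElem ht] at h3
          simp only [ne_eq, Option.some.injEq] at h3
          simp only [pvCP, if_neg h3]
          simp
        · rw [List.drop_eq_nil_of_le (as := tk.reverse) (by simp; omega), pvCP_nil_right]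
          simp
      · rw [List.drop_eq_nil_of_le (as := suf.reverse) (by simp; omega)]
        simp [pvCP]

theorem pvCP_length_le (a b : List String) : (pvCP a b).length ≤ a.length :=
  (pvCP_prefix a b).length_le

theorem pvCS_eq (suf tk : List String) :
    pvCS suf tk = (pvCP suf.reverse tk.reverse).reverse := by
  unfold pvCS
  rw [PySem.List.slice_from_natCast]
  rw [pvCSLoop_eq suf tk (min suf.length tk.length) 0 (by omega)]
  simp only [List.drop_zero, Nat.zero_add]
  have hm : (pvCP suf.reverse tk.reverse).length ≤ suf.length := by
    have := pvCP_length_le suf.reverse tk.reverse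
    simpa using this
  have htake : pvCP suf.reverse tk.reverse = suf.reverse.take (pvCP suf.reverse tk.reverse).length :=
    List.prefix_iff_eq_take.mp (pvCP_prefix _ _)
  rw [htake, List.reverse_take]
  simp
  omega

theorem foldl_pvCS_eq : ∀ (rest : List (List String)) (t0 : List String),
    rest.foldl pvCS t0 = ((rest.map List.reverse).foldl pvCP t0.reverse).reverse
  | [], t0 => by simp
  | r :: rest, t0 => by
    simp only [List.foldl_cons, List.map_cons]
    rw [foldl_pvCS_eq rest (pvCS t0 r), pvCS_eq]
    simp

theorem foldl_min_cast : ∀ (ls : List (List String)) (x : Nat),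
    (ls.map (fun l => (l.length : Int))).foldl min (x : Int)
      = (((ls.map List.length).foldl min x : Nat) : Int)
  | [], x => rfl
  | r :: ls, x => by
    simp only [List.map_cons, List.foldl_cons]
    rw [show ((x : Int) ⊓ (r.length : Int)) = (((min x r.length : Nat)) : Int) by
      simp [Nat.cast_min], foldl_min_cast ls (min x r.length)]

theorem min?_len_eq (t0 : List String) (rest : List (List String)) :
    PySem.List.min? (((t0 :: rest)).map (fun x => (x.length : Int))) (fun v => v)
      = some (((rest.map List.length).foldl min t0.length : Nat) : Int) := by
  rw [List.map_cons, PySem.List.min?_id_cons]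
  congr 1
  exact foldl_min_cast rest t0.length

theorem minfold_le_init : ∀ (rest : List Nat) (x : Nat), rest.foldl min x ≤ x
  | [], _ => le_rfl
  | r :: rest, x => le_trans (minfold_le_init rest (min x r)) (by omega)

theorem le_minfold : ∀ (rest : List Nat) (x c : Nat), c ≤ x → (∀ y ∈ rest, c ≤ y) →
    c ≤ rest.foldl min x
  | [], _, _, hx, _ => hx
  | r :: rest, x, c, hx, h =>
    le_minfold rest (min x r) c (by have := h r (by simp); omega) (fun y hy => h y (by simp [hy]))

-- pvAnyDiff over the index range 1..len(tks) is an any over rest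
theorem pvAnyDiff_eq (t0 : List String) (rest : List (List String)) (i : Int) :
    pvAnyDiff (t0 :: rest) i
      = rest.any (fun r => decide (PySem.List.pyGet? r i ≠ PySem.List.pyGet? t0 i)) := by
  unfold pvAnyDiff
  rw [Bool.eq_iff_iff]
  simp only [List.any_eq_true, decide_eq_true_eq]
  have h0 : PySem.List.pyGetD (t0 :: rest) 0 [] = t0 := by simp [pysem]
  rw [h0]
  constructor
  · rintro ⟨j, hj, hne⟩
    rw [PySem.List.mem_pyRange_one] at hj
    obtain ⟨h1, h2⟩ := hj
    simp only [List.length_cons] at h2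
    have hk : j = ((j.toNat : Nat) : Int) := by omega
    rw [hk, PySem.List.pyGetD_natCast] at hne
    obtain ⟨k, hk2⟩ : ∃ k, j.toNat = k + 1 := ⟨j.toNat - 1, by omega⟩
    rw [hk2, List.getD_cons_succ] at hne
    have hklt : k < rest.length := by omega
    exact ⟨rest.getD k [], by rw [List.getD_eq_getElem rest [] hklt]; exact List.getElem_mem hklt, hne⟩
  · rintro ⟨r, hr, hne⟩
    obtain ⟨k, hk, hr2⟩ := List.mem_iff_getElem.mp hr
    refine ⟨((k + 1 : Nat) : Int), ?_, ?_⟩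
    · rw [PySem.List.mem_pyRange_one]
      refine ⟨by omega, ?_⟩
      simp only [List.length_cons]
      push_cast
      omega
    · rw [PySem.List.pyGetD_natCast, List.getD_cons_succ, List.getD_eq_getElem rest [] hk, hr2]
      exact hne

-- A's loop, run against a known run of agreeing columns
theorem pvALoop_run (tks : List (List String)) : ∀ (fuel k c : Nat),
    c ≤ fuel →
    (∀ j < c, pvAnyDiff tks (-1 - ((k + j : Nat) : Int)) = false) →
    (c < fuel → pvAnyDiff tks (-1 - ((k + c : Nat) : Int)) = true) →
    pvALoop tks fuel (-1 - (k : Int)) = -1 - (k : Int) - (c : Int)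
  | 0, k, c => by
    intro hc _ _
    interval_cases c
    simp [pvALoop]
  | fuel + 1, k, c => by
    intro hc hrun hstop
    rw [pvALoop]
    by_cases hd : pvAnyDiff tks (-1 - (k : Int)) = true
    · rw [if_pos hd]
      have hc0 : c = 0 := by
        by_contra h
        have := hrun 0 (by omega)
        simp only [Nat.add_zero] at this
        rw [this] at hd
        exact absurd hd (by simp)
      simp [hc0]
    · rw [if_neg hd]
      have hcpos : c ≠ 0 := by
        intro h0
        subst h0
        have := hstop (by omega)
        simp only [Nat.add_zero] at this
        exact hd this
      obtain ⟨c', rfl⟩ : ∃ c', c = c' + 1 := ⟨c - 1, by omega⟩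
      have : (-1 - (k : Int) - 1) = -1 - ((k + 1 : Nat) : Int) := by push_cast; ring
      rw [this, pvALoop_run tks fuel (k + 1) c' (by omega)
        (fun j hj => by
          have := hrun (j + 1) (by omega)
          rw [show (k + 1 + j) = k + (j + 1) by omega]
          exact this)
        (fun h => by
          have := hstop (by omega)
          rw [show (k + 1 + c') = k + (c' + 1) by omega]
          exact this)]
      push_cast
      ring

-- ===== VERDICT (by name: the statement is the Claim_ definition above) =====
theorem get_token_index_before_common_suffix_py_spec : Claim_equal_get_token_index_before_common_suffix_py := by
  intro tks _ hpre
  unfold Spec_get_token_index_before_common_suffix_py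
  cases tks with
  | nil => exact absurd rfl hpre
  | cons t0 rest =>
    unfold get_token_index_before_common_suffix_py get_token_index_before_common_suffix_py_alt
    rw [min?_len_eq]
    dsimp only
    rw [foldl_pvCS_eq]
    simp only [Int.toNat_natCast, List.length_reverse]
    set rs := rest.map List.reverse with hrs
    set M := (rest.map List.length).foldl min t0.length with hMdef
    set C := ((rs.foldl pvCP t0.reverse)).length with hCdef
    have key : ∀ j, j < C → j < t0.reverse.length ∧ ∀ r ∈ rs, r[j]? = t0.reverse[j]? :=
      fun j hj => ((lt_length_foldl_pvCP_iff rs t0.reverse j).mp hj) j le_rfl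
    have hCM : C ≤ M := by
      by_cases hC0 : C = 0
      · omega
      · obtain ⟨hlen, hall⟩ := key (C - 1) (by omega)
        refine le_minfold (rest.map List.length) t0.length C (by have := hlen; simp at this; omega) ?_
        intro y hy
        obtain ⟨l, hl, rfl⟩ := List.mem_map.mp hy
        have hr := hall l.reverse (List.mem_map.mpr ⟨l, hl, rfl⟩)
        rw [List.getElem?_eq_getElem hlen] at hr
        have : C - 1 < l.reverse.length := by
          by_contra hcon
          rw [List.getElem?_eq_none (by omega)] at hr
          exact absurd hr (by simp)
        simp only [List.length_reverse] at this
        omega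
    have run : ∀ j, j < C → pvAnyDiff (t0 :: rest) (-1 - ((j : Nat) : Int)) = false := by
      intro j hj
      obtain ⟨hlen, hall⟩ := key j hj
      rw [pvAnyDiff_eq]
      simp only [List.any_eq_false, decide_eq_true_eq]
      intro r hr hne
      apply hne
      rw [pyGet?_neg_rev, pyGet?_neg_rev]
      exact hall r.reverse (List.mem_map.mpr ⟨r, hr, rfl⟩)
    have stop : C < M → pvAnyDiff (t0 :: rest) (-1 - ((C : Nat) : Int)) = true := by
      intro hCltM
      have hMt0 : M ≤ t0.length := minfold_le_init _ _
      have hlen : C < t0.reverse.length := by simp; omega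
      have hfail : ¬ C < C := by omega
      rw [hCdef] at hfail
      rw [lt_length_foldl_pvCP_iff] at hfail
      push_neg at hfail
      obtain ⟨j, hjC, hnp⟩ := hfail
      have hjeq : j = C := by
        by_contra hne
        obtain ⟨r, hrm, hrne⟩ := hnp (key j (by omega)).1
        exact hrne ((key j (by omega)).2 r hrm)
      subst hjeq
      obtain ⟨r, hrmem, hrne⟩ := hnp hlen
      obtain ⟨l, hl, rfl⟩ := List.mem_map.mp hrmem
      rw [pvAnyDiff_eq]
      simp only [List.any_eq_true, decide_eq_true_eq]
      refine ⟨l, hl, ?_⟩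
      rw [pyGet?_neg_rev, pyGet?_neg_rev]
      exact hrne
    have hres := pvALoop_run (t0 :: rest) M 0 C hCM
      (fun j hj => by simpa using run j hj)
      (fun h => by simpa using stop h)
    simp only [Nat.cast_zero] at hres
    have h1 : (-1 : Int) - 0 = -1 := by ring
    rw [h1] at hres
    rw [hres]
    ring
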